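-- pv_equiv track=rewrite | github.com/ruxailab/disgitbot | discord_bot/src/utils/role_utils.py | get_next_role
-- ===== SOURCE A (Python) =====
-- PR_THRESHOLDS = {
--     "Beginner (1-5 PRs)": 1,
--     "Contributor (6-15 PRs)": 6,
--     "Analyst (16-30 PRs)": 16,
--     "Expert (31-50 PRs)": 31,
--     "Master (51+ PRs)": 51
-- }
--
-- ISSUE_THRESHOLDS = {
--     "Beginner (1-5 Issues)": 1,
--     "Contributor (6-15 Issues)": 6,
--     "Analyst (16-30 Issues)": 16,
--     "Expert (31-50 Issues)": 31,
--     "Master (51+ Issues)": 51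
-- }
--
-- COMMIT_THRESHOLDS = {
--     "Beginner (1-50 Commits)": 1,
--     "Contributor (51-100 Commits)": 51,
--     "Analyst (101-250 Commits)": 101,
--     "Expert (251-500 Commits)": 251,
--     "Master (501+ Commits)": 501
-- }
--
-- PR_DESCRIPTIONS = {
--     "Beginner (1-5 PRs)": "1-5 PRs opened",
--     "Contributor (6-15 PRs)": "6-15 PRs opened",
--     "Analyst (16-30 PRs)": "16-30 PRs opened",
--     "Expert (31-50 PRs)": "31-50 PRs opened",
--     "Master (51+ PRs)": "51+ PRs opened"
-- }
--
-- ISSUE_DESCRIPTIONS = {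
--     "Beginner (1-5 Issues)": "1-5 Issues opened",
--     "Contributor (6-15 Issues)": "6-15 Issues opened",
--     "Analyst (16-30 Issues)": "16-30 Issues opened",
--     "Expert (31-50 Issues)": "31-50 Issues opened",
--     "Master (51+ Issues)": "51+ Issues opened"
-- }
--
-- COMMIT_DESCRIPTIONS = {
--     "Beginner (1-50 Commits)": "1-50 commits",
--     "Contributor (51-100 Commits)": "51-100 commits",
--     "Analyst (101-250 Commits)": "101-250 commits",
--     "Expert (251-500 Commits)": "251-500 commits",
--     "Master (501+ Commits)": "501+ commits"
-- }
--
-- def get_next_role(current_role, stats_type):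
--     """
--     Determine the next role based on the current role and stats type.
--
--     Args:
--         current_role: The current role of the user
--         stats_type: 'pr', 'issue', or 'commit'
--
--     Returns:
--         A string describing the next role, or a message if the user has reached the highest level
--     """
--     if stats_type == "pr":
--         thresholds = PR_THRESHOLDS
--         descriptions = PR_DESCRIPTIONS
--     elif stats_type == "issue":
--         thresholds = ISSUE_THRESHOLDS
--         descriptions = ISSUE_DESCRIPTIONS
--     elif stats_type == "commit":
--         thresholds = COMMIT_THRESHOLDS
--         descriptions = COMMIT_DESCRIPTIONS
--     else:
--         return "Unknown"
--
--     # Handle case where current_role is None or not in thresholds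
--     if current_role == "None" or current_role is None:
--         # Get the first role for this stat type
--         if thresholds:
--             first_role = list(thresholds.keys())[0]
--             return f"@{first_role} ({descriptions[first_role]})"
--         return "Unknown"
--
--     # Convert thresholds to ordered list of (role, threshold) pairs
--     role_list = list(thresholds.items())
--
--     # Find current role in the list
--     for i, (role, _) in enumerate(role_list):
--         if role == current_role:
--             # Check if this is the highest role
--             if i == len(role_list) - 1:
--                 return "You've reached the highest level!"
--
--             # Return the next role with its description
--             next_role = role_list[i + 1][0]
--             return f"@{next_role} ({descriptions[next_role]})"
--
--     return "Unknown"
-- ===== SOURCE B (Python) =====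
-- PR_THRESHOLDS = {
--     "Beginner (1-5 PRs)": 1,
--     "Contributor (6-15 PRs)": 6,
--     "Analyst (16-30 PRs)": 16,
--     "Expert (31-50 PRs)": 31,
--     "Master (51+ PRs)": 51
-- }
--
-- ISSUE_THRESHOLDS = {
--     "Beginner (1-5 Issues)": 1,
--     "Contributor (6-15 Issues)": 6,
--     "Analyst (16-30 Issues)": 16,
--     "Expert (31-50 Issues)": 31,
--     "Master (51+ Issues)": 51
-- }
--
-- COMMIT_THRESHOLDS = {
--     "Beginner (1-50 Commits)": 1,
--     "Contributor (51-100 Commits)": 51,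
--     "Analyst (101-250 Commits)": 101,
--     "Expert (251-500 Commits)": 251,
--     "Master (501+ Commits)": 501
-- }
--
-- PR_DESCRIPTIONS = {
--     "Beginner (1-5 PRs)": "1-5 PRs opened",
--     "Contributor (6-15 PRs)": "6-15 PRs opened",
--     "Analyst (16-30 PRs)": "16-30 PRs opened",
--     "Expert (31-50 PRs)": "31-50 PRs opened",
--     "Master (51+ PRs)": "51+ PRs opened"
-- }
--
-- ISSUE_DESCRIPTIONS = {
--     "Beginner (1-5 Issues)": "1-5 Issues opened",
--     "Contributor (6-15 Issues)": "6-15 Issues opened",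
--     "Analyst (16-30 Issues)": "16-30 Issues opened",
--     "Expert (31-50 Issues)": "31-50 Issues opened",
--     "Master (51+ Issues)": "51+ Issues opened"
-- }
--
-- COMMIT_DESCRIPTIONS = {
--     "Beginner (1-50 Commits)": "1-50 commits",
--     "Contributor (51-100 Commits)": "51-100 commits",
--     "Analyst (101-250 Commits)": "101-250 commits",
--     "Expert (251-500 Commits)": "251-500 commits",
--     "Master (501+ Commits)": "501+ commits"
-- }
--
-- # Precompute every possible answer once, at import time: one flat table keyed by
-- # (stats_type, current_role).  The function itself is then a single lookup.
-- _ANSWERS = {}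
-- for _st, (_th, _de) in (("pr", (PR_THRESHOLDS, PR_DESCRIPTIONS)),
--                         ("issue", (ISSUE_THRESHOLDS, ISSUE_DESCRIPTIONS)),
--                         ("commit", (COMMIT_THRESHOLDS, COMMIT_DESCRIPTIONS))):
--     _ks = list(_th)
--     _ANSWERS[(_st, None)] = _ANSWERS[(_st, "None")] = f"@{_ks[0]} ({_de[_ks[0]]})"
--     for _a, _b in zip(_ks, _ks[1:]):
--         _ANSWERS[(_st, _a)] = f"@{_b} ({_de[_b]})"
--     _ANSWERS[(_st, _ks[-1])] = "You've reached the highest level!"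
--
--
-- def get_next_role(current_role, stats_type):
--     """One flat memo table lookup; anything not tabulated is Unknown."""
--     return _ANSWERS.get((stats_type, current_role), "Unknown")
-- ===== Notes on version B (the rewrite author's own statement) =====
-- stated objective: simpler
-- what changed: B precomputes at module load one flat memo table mapping every (stats_type, current_role) key -- including the None/'None' entries and the highest-tier entry -- to its final answer string, so the function body is a single dict lookup with 'Unknown' as default, replacing A's per-call type dispatch, None guard and enumerate scan with index arithmetic.
import Mathlib
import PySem

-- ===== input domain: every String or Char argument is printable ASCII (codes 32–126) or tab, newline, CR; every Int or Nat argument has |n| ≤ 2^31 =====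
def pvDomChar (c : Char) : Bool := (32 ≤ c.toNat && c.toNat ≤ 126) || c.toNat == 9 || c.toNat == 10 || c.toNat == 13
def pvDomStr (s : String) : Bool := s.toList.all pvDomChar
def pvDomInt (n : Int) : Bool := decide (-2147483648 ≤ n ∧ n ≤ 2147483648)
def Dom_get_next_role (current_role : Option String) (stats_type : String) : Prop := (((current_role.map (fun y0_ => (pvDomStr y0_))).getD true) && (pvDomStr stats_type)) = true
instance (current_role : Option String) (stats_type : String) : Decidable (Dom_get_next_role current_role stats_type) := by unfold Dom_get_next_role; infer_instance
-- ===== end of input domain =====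

-- B tabulates every possible answer once into one flat table keyed by (stats_type, current_role);
-- the function itself is a single default lookup — simpler, no per-call branching or scan.

-- ===== PORT A =====
def pvPRT : PySem.Dict String Int := PySem.Dict.ofList
  [("Beginner (1-5 PRs)", 1), ("Contributor (6-15 PRs)", 6), ("Analyst (16-30 PRs)", 16),
   ("Expert (31-50 PRs)", 31), ("Master (51+ PRs)", 51)]
def pvIT : PySem.Dict String Int := PySem.Dict.ofList
  [("Beginner (1-5 Issues)", 1), ("Contributor (6-15 Issues)", 6), ("Analyst (16-30 Issues)", 16),
   ("Expert (31-50 Issues)", 31), ("Master (51+ Issues)", 51)]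
def pvCT : PySem.Dict String Int := PySem.Dict.ofList
  [("Beginner (1-50 Commits)", 1), ("Contributor (51-100 Commits)", 51), ("Analyst (101-250 Commits)", 101),
   ("Expert (251-500 Commits)", 251), ("Master (501+ Commits)", 501)]
def pvPRD : PySem.Dict String String := PySem.Dict.ofList
  [("Beginner (1-5 PRs)", "1-5 PRs opened"), ("Contributor (6-15 PRs)", "6-15 PRs opened"),
   ("Analyst (16-30 PRs)", "16-30 PRs opened"), ("Expert (31-50 PRs)", "31-50 PRs opened"),
   ("Master (51+ PRs)", "51+ PRs opened")]
def pvID : PySem.Dict String String := PySem.Dict.ofList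
  [("Beginner (1-5 Issues)", "1-5 Issues opened"), ("Contributor (6-15 Issues)", "6-15 Issues opened"),
   ("Analyst (16-30 Issues)", "16-30 Issues opened"), ("Expert (31-50 Issues)", "31-50 Issues opened"),
   ("Master (51+ Issues)", "51+ Issues opened")]
def pvCD : PySem.Dict String String := PySem.Dict.ofList
  [("Beginner (1-50 Commits)", "1-50 commits"), ("Contributor (51-100 Commits)", "51-100 commits"),
   ("Analyst (101-250 Commits)", "101-250 commits"), ("Expert (251-500 Commits)", "251-500 commits"),
   ("Master (501+ Commits)", "501+ commits")]

-- the 'for i, (role, _) in enumerate(role_list)' loop of A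
def pvScanA (role_list : List (String × Int)) (n : Int) (descriptions : PySem.Dict String String)
    (cr : String) : List (Int × (String × Int)) → String
  | [] => "Unknown"
  | (i, (role, _)) :: rest =>
    if role == cr then
      if i == n - 1 then "You've reached the highest level!"
      else
        let next_role := (PySem.List.pyGetD role_list (i + 1) ("", 0)).1
        "@" ++ next_role ++ " (" ++ descriptions.getD next_role "" ++ ")"
    else pvScanA role_list n descriptions cr rest

-- body shared after the stats_type dispatch (A assigns thresholds/descriptions, then runs this)
def pvBodyA (thresholds : PySem.Dict String Int) (descriptions : PySem.Dict String String)
    (current_role : Option String) : String :=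
  if current_role == some "None" || current_role == none then
    if thresholds.items ≠ [] then
      let first_role := PySem.List.pyGetD thresholds.keys 0 ""
      "@" ++ first_role ++ " (" ++ descriptions.getD first_role "" ++ ")"
    else "Unknown"
  else
    let role_list := thresholds.items
    pvScanA role_list (role_list.length : Int) descriptions (current_role.getD "")
      (PySem.List.enumerate role_list 0)

def get_next_role (current_role : Option String) (stats_type : String) : String :=
  if stats_type == "pr" then pvBodyA pvPRT pvPRD current_role
  else if stats_type == "issue" then pvBodyA pvIT pvID current_role
  else if stats_type == "commit" then pvBodyA pvCT pvCD current_role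
  else "Unknown"

-- ===== PORT B =====
-- the module-level loop of Source B that tabulates all answers for one stats type
def pvBuildOne (st : String) (th : PySem.Dict String Int) (de : PySem.Dict String String)
    (acc : PySem.Dict (String × Option String) String) : PySem.Dict (String × Option String) String :=
  let ks := th.keys
  let k0 := PySem.List.pyGetD ks 0 ""
  let first := "@" ++ k0 ++ " (" ++ de.getD k0 "" ++ ")"
  let acc := (acc.insert (st, none) first).insert (st, some "None") first
  let acc := (ks.zip ks.tail).foldl
    (fun acc ab => acc.insert (st, some ab.1) ("@" ++ ab.2 ++ " (" ++ de.getD ab.2 "" ++ ")")) acc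
  acc.insert (st, some (ks.getLast?.getD "")) "You've reached the highest level!"

def pvAnswers : PySem.Dict (String × Option String) String :=
  [("pr", (pvPRT, pvPRD)), ("issue", (pvIT, pvID)), ("commit", (pvCT, pvCD))].foldl
    (fun acc e => pvBuildOne e.1 e.2.1 e.2.2 acc) PySem.Dict.empty

def get_next_role_alt (current_role : Option String) (stats_type : String) : String :=
  pvAnswers.getD (stats_type, current_role) "Unknown"

-- ===== PRECONDITION & SPEC =====
def Spec_get_next_role (current_role : Option String) (stats_type : String) (out : String) : Prop := out = get_next_role_alt current_role stats_type
instance (current_role : Option String) (stats_type : String) (out : String) : Decidable (Spec_get_next_role current_role stats_type out) := by unfold Spec_get_next_role; infer_instance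

-- ===== CLAIM (what is proved, stated in full; the proofs are below) =====
def Claim_equal_get_next_role : Prop := ∀ (current_role : Option String) (stats_type : String), Dom_get_next_role current_role stats_type → Spec_get_next_role current_role stats_type (get_next_role current_role stats_type)

-- ===== LEMMAS AND PROOFS =====
theorem pvBeqProd (a c : String) (b d : Option String) : ((a, b) == (c, d)) = (a == c && b == d) := rfl

theorem pvAnswers_eq : pvAnswers = PySem.Dict.mk
  [(("pr", none), "@Beginner (1-5 PRs) (1-5 PRs opened)"),
   (("pr", some "None"), "@Beginner (1-5 PRs) (1-5 PRs opened)"),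
   (("pr", some "Beginner (1-5 PRs)"), "@Contributor (6-15 PRs) (6-15 PRs opened)"),
   (("pr", some "Contributor (6-15 PRs)"), "@Analyst (16-30 PRs) (16-30 PRs opened)"),
   (("pr", some "Analyst (16-30 PRs)"), "@Expert (31-50 PRs) (31-50 PRs opened)"),
   (("pr", some "Expert (31-50 PRs)"), "@Master (51+ PRs) (51+ PRs opened)"),
   (("pr", some "Master (51+ PRs)"), "You've reached the highest level!"),
   (("issue", none), "@Beginner (1-5 Issues) (1-5 Issues opened)"),
   (("issue", some "None"), "@Beginner (1-5 Issues) (1-5 Issues opened)"),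
   (("issue", some "Beginner (1-5 Issues)"), "@Contributor (6-15 Issues) (6-15 Issues opened)"),
   (("issue", some "Contributor (6-15 Issues)"), "@Analyst (16-30 Issues) (16-30 Issues opened)"),
   (("issue", some "Analyst (16-30 Issues)"), "@Expert (31-50 Issues) (31-50 Issues opened)"),
   (("issue", some "Expert (31-50 Issues)"), "@Master (51+ Issues) (51+ Issues opened)"),
   (("issue", some "Master (51+ Issues)"), "You've reached the highest level!"),
   (("commit", none), "@Beginner (1-50 Commits) (1-50 commits)"),
   (("commit", some "None"), "@Beginner (1-50 Commits) (1-50 commits)"),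
   (("commit", some "Beginner (1-50 Commits)"), "@Contributor (51-100 Commits) (51-100 commits)"),
   (("commit", some "Contributor (51-100 Commits)"), "@Analyst (101-250 Commits) (101-250 commits)"),
   (("commit", some "Analyst (101-250 Commits)"), "@Expert (251-500 Commits) (251-500 commits)"),
   (("commit", some "Expert (251-500 Commits)"), "@Master (501+ Commits) (501+ commits)"),
   (("commit", some "Master (501+ Commits)"), "You've reached the highest level!")] := by decide

theorem pvAlt_pr (cr : Option String) : get_next_role_alt cr "pr" = pvBodyA pvPRT pvPRD cr := by
  cases cr with
  | none => decide
  | some s =>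
    by_cases e0 : s = "None"; · subst e0; decide
    by_cases e1 : s = "Beginner (1-5 PRs)"; · subst e1; decide
    by_cases e2 : s = "Contributor (6-15 PRs)"; · subst e2; decide
    by_cases e3 : s = "Analyst (16-30 PRs)"; · subst e3; decide
    by_cases e4 : s = "Expert (31-50 PRs)"; · subst e4; decide
    by_cases e5 : s = "Master (51+ PRs)"; · subst e5; decide
    have f0 : (("None" : String) == s) = false := beq_eq_false_iff_ne.mpr (Ne.symm e0)
    have f1 : (("Beginner (1-5 PRs)" : String) == s) = false := beq_eq_false_iff_ne.mpr (Ne.symm e1)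
    have f2 : (("Contributor (6-15 PRs)" : String) == s) = false := beq_eq_false_iff_ne.mpr (Ne.symm e2)
    have f3 : (("Analyst (16-30 PRs)" : String) == s) = false := beq_eq_false_iff_ne.mpr (Ne.symm e3)
    have f4 : (("Expert (31-50 PRs)" : String) == s) = false := beq_eq_false_iff_ne.mpr (Ne.symm e4)
    have f5 : (("Master (51+ PRs)" : String) == s) = false := beq_eq_false_iff_ne.mpr (Ne.symm e5)
    have henum : PySem.List.enumerate (pvPRT).items = [(0, ("Beginner (1-5 PRs)", 1)), (1, ("Contributor (6-15 PRs)", 6)), (2, ("Analyst (16-30 PRs)", 16)), (3, ("Expert (31-50 PRs)", 31)), (4, ("Master (51+ PRs)", 51))] := by decide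
    simp [get_next_role_alt, pvAnswers_eq, PySem.Dict.getD, PySem.Dict.get?, pvBodyA, pvScanA, henum,
      List.find?, pvBeqProd, beq_iff_eq, f0, f1, f2, f3, f4, f5, e0]

theorem pvAlt_issue (cr : Option String) : get_next_role_alt cr "issue" = pvBodyA pvIT pvID cr := by
  cases cr with
  | none => decide
  | some s =>
    by_cases e0 : s = "None"; · subst e0; decide
    by_cases e1 : s = "Beginner (1-5 Issues)"; · subst e1; decide
    by_cases e2 : s = "Contributor (6-15 Issues)"; · subst e2; decide
    by_cases e3 : s = "Analyst (16-30 Issues)"; · subst e3; decide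
    by_cases e4 : s = "Expert (31-50 Issues)"; · subst e4; decide
    by_cases e5 : s = "Master (51+ Issues)"; · subst e5; decide
    have f0 : (("None" : String) == s) = false := beq_eq_false_iff_ne.mpr (Ne.symm e0)
    have f1 : (("Beginner (1-5 Issues)" : String) == s) = false := beq_eq_false_iff_ne.mpr (Ne.symm e1)
    have f2 : (("Contributor (6-15 Issues)" : String) == s) = false := beq_eq_false_iff_ne.mpr (Ne.symm e2)
    have f3 : (("Analyst (16-30 Issues)" : String) == s) = false := beq_eq_false_iff_ne.mpr (Ne.symm e3)
    have f4 : (("Expert (31-50 Issues)" : String) == s) = false := beq_eq_false_iff_ne.mpr (Ne.symm e4)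
    have f5 : (("Master (51+ Issues)" : String) == s) = false := beq_eq_false_iff_ne.mpr (Ne.symm e5)
    have henum : PySem.List.enumerate (pvIT).items = [(0, ("Beginner (1-5 Issues)", 1)), (1, ("Contributor (6-15 Issues)", 6)), (2, ("Analyst (16-30 Issues)", 16)), (3, ("Expert (31-50 Issues)", 31)), (4, ("Master (51+ Issues)", 51))] := by decide
    simp [get_next_role_alt, pvAnswers_eq, PySem.Dict.getD, PySem.Dict.get?, pvBodyA, pvScanA, henum,
      List.find?, pvBeqProd, beq_iff_eq, f0, f1, f2, f3, f4, f5, e0]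

theorem pvAlt_commit (cr : Option String) : get_next_role_alt cr "commit" = pvBodyA pvCT pvCD cr := by
  cases cr with
  | none => decide
  | some s =>
    by_cases e0 : s = "None"; · subst e0; decide
    by_cases e1 : s = "Beginner (1-50 Commits)"; · subst e1; decide
    by_cases e2 : s = "Contributor (51-100 Commits)"; · subst e2; decide
    by_cases e3 : s = "Analyst (101-250 Commits)"; · subst e3; decide
    by_cases e4 : s = "Expert (251-500 Commits)"; · subst e4; decide
    by_cases e5 : s = "Master (501+ Commits)"; · subst e5; decide
    have f0 : (("None" : String) == s) = false := beq_eq_false_iff_ne.mpr (Ne.symm e0)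
    have f1 : (("Beginner (1-50 Commits)" : String) == s) = false := beq_eq_false_iff_ne.mpr (Ne.symm e1)
    have f2 : (("Contributor (51-100 Commits)" : String) == s) = false := beq_eq_false_iff_ne.mpr (Ne.symm e2)
    have f3 : (("Analyst (101-250 Commits)" : String) == s) = false := beq_eq_false_iff_ne.mpr (Ne.symm e3)
    have f4 : (("Expert (251-500 Commits)" : String) == s) = false := beq_eq_false_iff_ne.mpr (Ne.symm e4)
    have f5 : (("Master (501+ Commits)" : String) == s) = false := beq_eq_false_iff_ne.mpr (Ne.symm e5)
    have henum : PySem.List.enumerate (pvCT).items = [(0, ("Beginner (1-50 Commits)", 1)), (1, ("Contributor (51-100 Commits)", 51)), (2, ("Analyst (101-250 Commits)", 101)), (3, ("Expert (251-500 Commits)", 251)), (4, ("Master (501+ Commits)", 501))] := by decide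
    simp [get_next_role_alt, pvAnswers_eq, PySem.Dict.getD, PySem.Dict.get?, pvBodyA, pvScanA, henum,
      List.find?, pvBeqProd, beq_iff_eq, f0, f1, f2, f3, f4, f5, e0]

-- ===== VERDICT (by name: the statement is the Claim_ definition above) =====
theorem get_next_role_spec : Claim_equal_get_next_role := by
  intro cr st _
  unfold Spec_get_next_role get_next_role
  by_cases hp : st = "pr"
  · subst hp; simp [pvAlt_pr cr]
  by_cases hi : st = "issue"
  · subst hi; simp [pvAlt_issue cr]
  by_cases hc : st = "commit"
  · subst hc; simp [pvAlt_commit cr]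
  have g0 : (("pr" : String) == st) = false := beq_eq_false_iff_ne.mpr (Ne.symm hp)
  have g1 : (("issue" : String) == st) = false := beq_eq_false_iff_ne.mpr (Ne.symm hi)
  have g2 : (("commit" : String) == st) = false := beq_eq_false_iff_ne.mpr (Ne.symm hc)
  simp only [beq_iff_eq, hp, hi, hc, if_false]
  simp [get_next_role_alt, pvAnswers_eq, PySem.Dict.getD, PySem.Dict.get?, List.find?, pvBeqProd,
    g0, g1, g2]
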